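-- pv_equiv track=rewrite | github.com/aminuolawale/algo_prep | graph_theory/3.4.dungeon_problem.py | build_path
-- ===== SOURCE A (Python) =====
-- from typing import List
--
-- def build_path(start: int, end: int, ancestor_array: List[int]) -> List[int]:
--     iterator = end
--     path = []
--     while iterator is not None:
--         path.append(iterator)
--         iterator = ancestor_array[iterator - 1]
--     path = list(reversed(path))
--     return path
-- ===== SOURCE B (Python) =====
-- def build_path(start, end, ancestor_array):
--     # pass 1: length of the ancestor chain from `end`
--     n = 0
--     node = end
--     while node is not None:
--         n += 1
--         node = ancestor_array[node - 1]
--     # pass 2: preallocate and fill back-to-front, walking the chain again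
--     path = [None] * n
--     node = end
--     for i in range(n - 1, -1, -1):
--         path[i] = node
--         node = ancestor_array[node - 1]
--     return path
-- ===== Notes on version B (the rewrite author's own statement) =====
-- stated objective: alternative
-- what changed: Replaces A's accumulate-then-reverse loop by a two-pass algorithm: one pass counts the chain length, then the output list is preallocated and filled back-to-front during a second walk, so no reversal and no list growth occur.
import Mathlib
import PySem

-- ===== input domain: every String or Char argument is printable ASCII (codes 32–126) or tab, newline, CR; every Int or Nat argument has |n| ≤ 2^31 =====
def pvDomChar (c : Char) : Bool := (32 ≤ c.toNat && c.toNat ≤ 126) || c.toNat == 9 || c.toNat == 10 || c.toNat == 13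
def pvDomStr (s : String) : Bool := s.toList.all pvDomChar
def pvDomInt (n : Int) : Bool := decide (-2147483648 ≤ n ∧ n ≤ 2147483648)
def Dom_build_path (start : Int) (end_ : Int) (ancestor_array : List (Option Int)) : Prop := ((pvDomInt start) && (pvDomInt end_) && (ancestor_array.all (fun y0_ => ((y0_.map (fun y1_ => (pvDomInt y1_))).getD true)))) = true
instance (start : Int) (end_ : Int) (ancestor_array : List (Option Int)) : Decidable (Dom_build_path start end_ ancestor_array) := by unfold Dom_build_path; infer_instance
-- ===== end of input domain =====

-- B replaces A's accumulate-then-reverse loop by a two-pass algorithm: count the chain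
-- length, then fill a preallocated output back-to-front on a second walk of the chain.

-- ===== PORT A =====
-- A's while loop: append the current label, step to ancestor_array[iterator-1] (Python
-- indexing via pyGet?, exact incl. negative wraparound); the Nat counter only makes the
-- loop total — under Pre_ the chain ends within ancestor_array.length + 1 steps.
def buildLoopA (ancestor_array : List (Option Int)) : Nat → Option Int → List Int → List Int
  | 0, _, path => path
  | _ + 1, none, path => path
  | fuel + 1, some v, path =>
    match PySem.List.pyGet? ancestor_array (v - 1) with
    | none => path ++ [v]          -- Python raises IndexError here; outside Pre_
    | some nxt => buildLoopA ancestor_array fuel nxt (path ++ [v])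

def build_path (start : Int) (end_ : Int) (ancestor_array : List (Option Int)) : List Int :=
  (buildLoopA ancestor_array (ancestor_array.length + 1) (some end_) []).reverse

-- ===== PORT B =====
-- B's pass 1: count the chain length (n += 1 per node); same totality counter as A's port.
def countB (ancestor_array : List (Option Int)) : Nat → Option Int → Nat
  | 0, _ => 0
  | fuel + 1, none => 0
  | fuel + 1, some v =>
    match PySem.List.pyGet? ancestor_array (v - 1) with
    | none => 1                    -- Python raises IndexError here; outside Pre_
    | some nxt => countB ancestor_array fuel nxt + 1

-- B's pass 2: the loop 'for i in range(n-1, -1, -1): path[i] = node; node = …' writes the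
-- preallocated list right-to-left, i.e. each step prepends the current node in front of
-- the already-written suffix — transcribed as a cons-accumulator; fuel is the exact count n.
def fillB (ancestor_array : List (Option Int)) : Nat → Option Int → List Int → List Int
  | 0, _, acc => acc
  | _ + 1, none, acc => acc
  | k + 1, some v, acc =>
    match PySem.List.pyGet? ancestor_array (v - 1) with
    | none => v :: acc             -- Python raises IndexError here; outside Pre_
    | some nxt => fillB ancestor_array k nxt (v :: acc)

def build_path_alt (start : Int) (end_ : Int) (ancestor_array : List (Option Int)) : List Int :=
  fillB ancestor_array
    (countB ancestor_array (ancestor_array.length + 1) (some end_)) (some end_) []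

-- ===== PRECONDITION & SPEC =====
-- One step of the ancestor chain: `some (some v)` = running at label v, `some none` =
-- reached None (A returns), `none` = index out of range (A raises IndexError); the two
-- terminal states are absorbing.
def ancStep (ancestor_array : List (Option Int)) : Option (Option Int) → Option (Option Int)
  | none => none
  | some none => some none
  | some (some v) => PySem.List.pyGet? ancestor_array (v - 1)

-- Pre_ = exactly the inputs on which A returns: the ancestor chain from end_ (with Python's
-- negative-index wraparound) reaches None; a chain that has not ended after length+1 steps
-- has repeated a position, so A diverges, and a hit outside [-len, len-1] is A's IndexError.
def Pre_build_path (start : Int) (end_ : Int) (ancestor_array : List (Option Int)) : Prop :=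
  (ancStep ancestor_array)^[ancestor_array.length + 1] (some (some end_)) = some none
instance (start : Int) (end_ : Int) (ancestor_array : List (Option Int)) : Decidable (Pre_build_path start end_ ancestor_array) := by unfold Pre_build_path; infer_instance

def pvWitness_build_path : Int × Int × List (Option Int) := (0, 3, [none, some 1, some 2])

def Spec_build_path (start : Int) (end_ : Int) (ancestor_array : List (Option Int)) (out : List Int) : Prop := out = build_path_alt start end_ ancestor_array
instance (start : Int) (end_ : Int) (ancestor_array : List (Option Int)) (out : List Int) : Decidable (Spec_build_path start end_ ancestor_array out) := by unfold Spec_build_path; infer_instance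

-- ===== CLAIM (what is proved, stated in full; the proofs are below) =====
def Claim_equal_build_path : Prop := ∀ (start : Int) (end_ : Int) (ancestor_array : List (Option Int)), Dom_build_path start end_ ancestor_array → Pre_build_path start end_ ancestor_array → Spec_build_path start end_ ancestor_array (build_path start end_ ancestor_array)

-- ===== LEMMAS AND PROOFS =====

-- Reference chain: the node labels in A's visit order, cut off by fuel.
def pathSeq (ancestor_array : List (Option Int)) : Nat → Option Int → List Int
  | 0, _ => []
  | _ + 1, none => []
  | f + 1, some v =>
    match PySem.List.pyGet? ancestor_array (v - 1) with
    | none => [v]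
    | some nxt => v :: pathSeq ancestor_array f nxt

-- A's loop appends exactly the visit-order chain after its accumulator.
theorem buildLoopA_eq (arr : List (Option Int)) :
    ∀ (fuel : Nat) (it : Option Int) (path : List Int),
      buildLoopA arr fuel it path = path ++ pathSeq arr fuel it := by
  intro fuel
  induction fuel with
  | zero => intro it path; simp [buildLoopA, pathSeq]
  | succ f ih =>
    intro it path
    cases it with
    | none => simp [buildLoopA, pathSeq]
    | some v =>
      simp only [buildLoopA, pathSeq]
      cases PySem.List.pyGet? arr (v - 1) with
      | none => simp
      | some nxt => simp [ih]

-- B's fill pass, run with B's counted length as fuel, produces the reversed chain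
-- in front of its accumulator — with no hypothesis on termination.
theorem fillB_countB_eq (arr : List (Option Int)) :
    ∀ (f : Nat) (it : Option Int) (acc : List Int),
      fillB arr (countB arr f it) it acc = (pathSeq arr f it).reverse ++ acc := by
  intro f
  induction f with
  | zero => intro it acc; simp [countB, fillB, pathSeq]
  | succ f ih =>
    intro it acc
    cases it with
    | none => simp [countB, fillB, pathSeq]
    | some v =>
      simp only [countB, pathSeq]
      cases h : PySem.List.pyGet? arr (v - 1) with
      | none => simp [fillB, h]
      | some nxt => simp [fillB, h, ih]

-- ===== VERDICT (by name: the statement is the Claim_ definition above) =====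
theorem build_path_spec : Claim_equal_build_path := by
  intro start end_ ancestor_array _ _
  unfold Spec_build_path build_path build_path_alt
  rw [buildLoopA_eq, fillB_countB_eq]
  simp
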